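-- pv_equiv track=rewrite | github.com/dantwoashim/Project_Parva | scripts/release/check_frontend_bundle_budget.py | _summarize_assets
-- ===== SOURCE A (Python) =====
-- def _summarize_assets(assets: list[dict[str, object]]) -> dict[str, int]:
--     js_assets = [int(asset["bytes"]) for asset in assets if asset["kind"] == "js"]
--     css_assets = [int(asset["bytes"]) for asset in assets if asset["kind"] == "css"]
--     return {
--         "total_js_bytes": sum(js_assets),
--         "max_js_bytes": max(js_assets, default=0),
--         "total_css_bytes": sum(css_assets),
--         "max_css_bytes": max(css_assets, default=0),
--     }
-- ===== SOURCE B (Python) =====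
-- def _summarize_assets(assets: list[dict[str, object]]) -> dict[str, int]:
--     total_js = total_css = 0
--     max_js = max_css = None
--     for asset in assets:
--         kind = asset["kind"]
--         if kind == "js":
--             b = int(asset["bytes"])
--             total_js += b
--             if max_js is None or b > max_js:
--                 max_js = b
--         elif kind == "css":
--             b = int(asset["bytes"])
--             total_css += b
--             if max_css is None or b > max_css:
--                 max_css = b
--     return {
--         "total_js_bytes": total_js,
--         "max_js_bytes": 0 if max_js is None else max_js,
--         "total_css_bytes": total_css,
--         "max_css_bytes": 0 if max_css is None else max_css,
--     }
-- ===== Notes on version B (the rewrite author's own statement) =====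
-- stated objective: alternative
-- what changed: Replaces the two filtering list comprehensions plus sum/max passes with a single loop over assets maintaining running totals and Optional running maxima per kind, resolved to 0 after the loop.
import Mathlib
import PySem

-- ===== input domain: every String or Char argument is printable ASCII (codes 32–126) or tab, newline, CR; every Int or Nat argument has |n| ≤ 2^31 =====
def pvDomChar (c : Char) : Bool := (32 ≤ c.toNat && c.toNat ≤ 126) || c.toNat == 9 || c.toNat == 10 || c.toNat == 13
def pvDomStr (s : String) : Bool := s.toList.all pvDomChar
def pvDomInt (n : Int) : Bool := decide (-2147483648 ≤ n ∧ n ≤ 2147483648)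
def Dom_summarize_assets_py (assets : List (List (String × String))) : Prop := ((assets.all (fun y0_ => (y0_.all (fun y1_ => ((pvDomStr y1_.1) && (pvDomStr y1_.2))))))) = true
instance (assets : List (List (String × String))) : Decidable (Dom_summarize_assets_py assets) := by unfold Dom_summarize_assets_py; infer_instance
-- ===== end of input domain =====

-- B replaces A's two filtering comprehensions and separate sum/max passes by one loop over
-- assets keeping running totals and Optional running maxima per kind (alternative decomposition).


-- ===== PORT A =====
-- asset["kind"] / int(asset["bytes"]): dict lookup is first-match (PySem.Dict.get?), int() is
-- PySem.Int.ofStr?.  The .getD defaults are never reached inside Pre_ (where Python returns).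
def pvKind (a : List (String × String)) : String :=
  ((PySem.Dict.mk a).get? "kind").getD ""

def pvBytes (a : List (String × String)) : Int :=
  (((PySem.Dict.mk a).get? "bytes").bind PySem.Int.ofStr?).getD 0

def summarize_assets_py (assets : List (List (String × String))) : List (String × Int) :=
  let js_assets := (assets.filter (fun a => pvKind a == "js")).map pvBytes
  let css_assets := (assets.filter (fun a => pvKind a == "css")).map pvBytes
  [("total_js_bytes", js_assets.sum),
   ("max_js_bytes", PySem.List.maxD js_assets (fun x => x) 0),
   ("total_css_bytes", css_assets.sum),
   ("max_css_bytes", PySem.List.maxD css_assets (fun x => x) 0)]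

-- ===== PORT B =====
-- 'if max is None or b > max: max = b'
def pvMaxStep (m : Option Int) (b : Int) : Option Int :=
  match m with
  | none => some b
  | some v => if v < b then some b else some v

-- '0 if m is None else m'
def pvResolve (m : Option Int) : Int := m.getD 0

-- B's loop body: dispatch on kind, update the matching total and running max.
def pvStep (st : Int × Option Int × Int × Option Int) (a : List (String × String)) :
    Int × Option Int × Int × Option Int :=
  let kind := pvKind a
  if kind == "js" then
    let b := pvBytes a
    (st.1 + b, pvMaxStep st.2.1 b, st.2.2.1, st.2.2.2)
  else if kind == "css" then
    let b := pvBytes a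
    (st.1, st.2.1, st.2.2.1 + b, pvMaxStep st.2.2.2 b)
  else st

def summarize_assets_py_alt (assets : List (List (String × String))) : List (String × Int) :=
  let st := assets.foldl pvStep (0, none, 0, none)
  [("total_js_bytes", st.1),
   ("max_js_bytes", pvResolve st.2.1),
   ("total_css_bytes", st.2.2.1),
   ("max_css_bytes", pvResolve st.2.2.2)]

-- ===== PRECONDITION & SPEC =====
-- Pre_: every asset has a "kind" entry, and each js/css asset has a "bytes" entry whose value
-- int() accepts — exactly where Python A returns (otherwise KeyError / ValueError).
def Pre_summarize_assets_py (assets : List (List (String × String))) : Prop :=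
  ∀ a ∈ assets, ((PySem.Dict.mk a).get? "kind").isSome ∧
    ((PySem.Dict.mk a).get? "kind" = some "js" ∨ (PySem.Dict.mk a).get? "kind" = some "css" →
      (((PySem.Dict.mk a).get? "bytes").bind PySem.Int.ofStr?).isSome)

instance (assets : List (List (String × String))) : Decidable (Pre_summarize_assets_py assets) := by
  unfold Pre_summarize_assets_py; infer_instance

def pvWitness_summarize_assets_py : (List (List (String × String))) :=
  [[("kind", "js"), ("bytes", "3")], [("kind", "css"), ("bytes", "-2")], [("kind", "map")]]

def Spec_summarize_assets_py (assets : List (List (String × String))) (out : List (String × Int)) : Prop := out = summarize_assets_py_alt assets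
instance (assets : List (List (String × String))) (out : List (String × Int)) : Decidable (Spec_summarize_assets_py assets out) := by unfold Spec_summarize_assets_py; infer_instance

-- ===== CLAIM (what is proved, stated in full; the proofs are below) =====
def Claim_equal_summarize_assets_py : Prop := ∀ (assets : List (List (String × String))), Dom_summarize_assets_py assets → Pre_summarize_assets_py assets → Spec_summarize_assets_py assets (summarize_assets_py assets)

-- ===== LEMMAS AND PROOFS =====

-- Loop invariant: B's fold from any state is the state updated by the js/css projections of A.
theorem pvFold_eq (assets : List (List (String × String)))
    (tj : Int) (mj : Option Int) (tc : Int) (mc : Option Int) :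
    assets.foldl pvStep (tj, mj, tc, mc) =
      (tj + (((assets.filter (fun a => pvKind a == "js")).map pvBytes).sum),
       ((assets.filter (fun a => pvKind a == "js")).map pvBytes).foldl pvMaxStep mj,
       tc + (((assets.filter (fun a => pvKind a == "css")).map pvBytes).sum),
       ((assets.filter (fun a => pvKind a == "css")).map pvBytes).foldl pvMaxStep mc) := by
  induction assets generalizing tj mj tc mc with
  | nil => simp
  | cons a rest ih =>
    simp only [List.foldl_cons, List.filter_cons]
    by_cases hjs : pvKind a == "js"
    · have hcss : ¬ (pvKind a == "css") := by
        simp only [beq_iff_eq] at hjs ⊢; simp [hjs]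
      simp [pvStep, hjs, hcss, ih, add_assoc]
    · by_cases hcss : pvKind a == "css"
      · simp [pvStep, hjs, hcss, ih, add_assoc]
      · simp [pvStep, hjs, hcss, ih]

-- Running pvMaxStep from a seen value is the ordinary running max.
theorem pvFoldMax_some (t : List Int) : ∀ c, t.foldl pvMaxStep (some c) = some (t.foldl max c) := by
  induction t with
  | nil => intro c; rfl
  | cons x t ih =>
    intro c
    simp only [List.foldl_cons, pvMaxStep]
    have h : (if c < x then some x else some c) = some (max c x) := by
      split_ifs with h
      · rw [max_eq_right (le_of_lt h)]
      · rw [max_eq_left (not_lt.mp h)]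
    rw [h, ih]

-- Python max(xs, default=0) equals running pvMaxStep from none, resolved with 0.
theorem pvMaxD_eq (xs : List Int) :
    PySem.List.maxD xs (fun x => x) 0 = pvResolve (xs.foldl pvMaxStep none) := by
  cases xs with
  | nil => rfl
  | cons x t =>
    simp only [PySem.List.maxD, PySem.List.max?_id_cons, List.foldl_cons]
    show (some (t.foldl max x)).getD 0 = pvResolve (t.foldl pvMaxStep (some x))
    rw [pvFoldMax_some]
    rfl

-- ===== VERDICT (by name: the statement is the Claim_ definition above) =====
theorem summarize_assets_py_spec : Claim_equal_summarize_assets_py := by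
  intro assets _ _
  unfold Spec_summarize_assets_py summarize_assets_py summarize_assets_py_alt
  rw [pvFold_eq]
  simp [pvMaxD_eq]
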